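-- pv_equiv track=rewrite | github.com/centre-for-humanities-computing/DaCy | dev/spacy_augmentation_dev.py | handle_morph
-- ===== SOURCE A (Python) =====
-- from typing import Callable, Iterator, List, Union
--
-- def handle_morph(
--     values: List[str], aug_ents: List[List[str]], entity_slices: List[tuple]
-- ) -> List[str]:
--     running_add = 0
--     for i, s in enumerate(entity_slices):
--         values[slice(s[0] + running_add, s[1] + running_add)] = [""] * len(aug_ents[i])
--         running_add += len(aug_ents[i]) - (s[1] - s[0])
--     return values
-- ===== SOURCE B (Python) =====
-- def handle_morph(values, aug_ents, entity_slices):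
--     # Piece-table rewrite (alternative algorithm): keep the current list as a sequence of pieces
--     # (spans of the original `values` and runs of ""), apply each slice
--     # replacement to the piece sequence, and materialize once at the end.
--     # NOTE: unlike A, B does not mutate `values` in place.
--     n = len(values)
--     pieces = [("o", 0, n)]          # ("o", lo, hi) span of values | ("f", m) run of m ""
--     length = n
--     running_add = 0
--
--     def clamp(idx, ln):             # Python slice-bound normalization (slice.indices)
--         return max(0, idx + ln) if idx < 0 else min(idx, ln)
--
--     def split(ps, k):               # (first k elements, rest) over the piece sequence
--         pre, post = [], []
--         rem = k
--         for p in ps: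
--             ln = (p[2] - p[1]) if p[0] == "o" else p[1]
--             if rem >= ln:
--                 pre.append(p)
--                 rem -= ln
--             elif rem <= 0:
--                 post.append(p)
--             else:
--                 if p[0] == "o":
--                     pre.append(("o", p[1], p[1] + rem))
--                     post.append(("o", p[1] + rem, p[2]))
--                 else:
--                     pre.append(("f", rem))
--                     post.append(("f", p[1] - rem))
--                 rem = 0
--         return pre, post
--
--     for (s0, s1), ents in zip(entity_slices, aug_ents):
--         a = clamp(s0 + running_add, length)
--         b = max(a, clamp(s1 + running_add, length))
--         pre, _ = split(pieces, a)
--         _, post = split(pieces, b)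
--         pieces = pre + [("f", len(ents))] + post
--         length += len(ents) - (b - a)
--         running_add += len(ents) - (s1 - s0)
--
--     out = []
--     for p in pieces:
--         if p[0] == "o":
--             out.extend(values[p[1]:p[2]])
--         else:
--             out.extend([""] * p[1])
--     return out
-- ===== Notes on version B (the rewrite author's own statement) =====
-- stated objective: alternative
-- what changed: B replaces A's repeated in-place list slice assignments by a piece table: the current list is kept as a sequence of (span-of-values | empty-string-run) pieces, each slice replacement edits only the piece sequence, and the token list is materialized once at the end; B does not mutate `values` in place (return-value equivalence).
import Mathlib
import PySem

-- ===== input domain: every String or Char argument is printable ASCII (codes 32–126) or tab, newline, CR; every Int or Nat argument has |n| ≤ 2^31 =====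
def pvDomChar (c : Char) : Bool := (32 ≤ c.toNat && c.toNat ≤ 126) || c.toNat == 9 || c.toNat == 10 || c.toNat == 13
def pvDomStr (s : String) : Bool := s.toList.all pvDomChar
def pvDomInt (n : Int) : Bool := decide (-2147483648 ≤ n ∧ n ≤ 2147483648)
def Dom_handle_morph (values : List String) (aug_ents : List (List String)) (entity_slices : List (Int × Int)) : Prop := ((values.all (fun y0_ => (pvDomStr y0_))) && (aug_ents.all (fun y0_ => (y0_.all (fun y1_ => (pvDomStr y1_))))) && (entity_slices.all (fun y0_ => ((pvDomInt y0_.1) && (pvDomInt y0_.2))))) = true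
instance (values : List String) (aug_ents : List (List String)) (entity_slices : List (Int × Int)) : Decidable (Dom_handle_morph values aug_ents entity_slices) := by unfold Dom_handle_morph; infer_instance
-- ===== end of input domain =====

-- B replaces A's repeated in-place slice assignments by a piece table edited per slice and
-- materialized once (alternative algorithm); equivalence is about the RETURN value only:
-- A mutates `values` in place, B does not.


-- ===== PORT A =====
-- exact Python list slice assignment `l[a:b] = x` (step 1): both bounds are normalized by
-- slice.indices (= PySem.List.clampIdx), and the deleted region is empty when stop < start.
def pySetSlice {α : Type} (l : List α) (a b : Int) (x : List α) : List α :=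
  let a' := PySem.List.clampIdx l.length a
  let b' := max a' (PySem.List.clampIdx l.length b)
  l.take a' ++ x ++ l.drop b'

def handle_morph (values : List String) (aug_ents : List (List String)) (entity_slices : List (Int × Int)) : List String :=
  -- for i, s in enumerate(entity_slices): values[s[0]+r : s[1]+r] = [""]*len(aug_ents[i]); r += ...
  (List.foldl (fun (st : List String × Int) (p : Int × (Int × Int)) =>
      let ents := PySem.List.pyGetD aug_ents p.1 []   -- aug_ents[i]; IndexError when i ≥ len(aug_ents), excluded by Pre_
      let fill := List.replicate ents.length ""       -- [""] * len(aug_ents[i])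
      (pySetSlice st.1 (p.2.1 + st.2) (p.2.2 + st.2) fill,
       st.2 + (ents.length : Int) - (p.2.2 - p.2.1)))
    (values, 0) (PySem.List.enumerate entity_slices)).1

-- ===== PORT B =====
inductive Piece where
  | orig : Nat → Nat → Piece    -- ("o", lo, hi): span values[lo:hi]
  | fill : Nat → Piece          -- ("f", m): run of m empty strings
deriving DecidableEq, Repr

def plen : Piece → Nat
  | .orig i j => j - i
  | .fill m => m

-- Source B's `clamp` (slice-bound normalization); the value is nonnegative, kept as Nat
def bclamp (idx : Int) (ln : Nat) : Nat :=
  if idx < 0 then (idx + ln).toNat else min idx.toNat ln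

-- Source B's `split`: (first k elements, rest) over the piece sequence
def psplit (k : Nat) : List Piece → List Piece × List Piece
  | [] => ([], [])
  | p :: t =>
    if plen p ≤ k then
      let r := psplit (k - plen p) t
      (p :: r.1, r.2)
    else if k = 0 then ([], p :: t)
    else match p with
      | .orig i j => ([.orig i (i + k)], .orig (i + k) j :: t)
      | .fill m => ([.fill k], .fill (m - k) :: t)

-- Source B's final materialization loop; values[lo:hi] with 0 ≤ lo ≤ hi is (drop lo).take (hi-lo)
-- (PySem.List.slice_natCast)
def mat (values : List String) : List Piece → List String
  | [] => []
  | .orig i j :: t => (values.drop i).take (j - i) ++ mat values t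
  | .fill m :: t => List.replicate m "" ++ mat values t

def handle_morph_alt (values : List String) (aug_ents : List (List String)) (entity_slices : List (Int × Int)) : List String :=
  let st := List.foldl (fun (st : List Piece × Nat × Int) (q : (Int × Int) × List String) =>
      let a := bclamp (q.1.1 + st.2.2) st.2.1
      let b := max a (bclamp (q.1.2 + st.2.2) st.2.1)
      let pre := (psplit a st.1).1
      let post := (psplit b st.1).2
      (pre ++ [Piece.fill q.2.length] ++ post,
       st.2.1 + q.2.length - (b - a),          -- length += len(ents) - (b - a)  (b - a ≤ length)
       st.2.2 + (q.2.length : Int) - (q.1.2 - q.1.1)))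
    ([Piece.orig 0 values.length], values.length, (0 : Int)) (entity_slices.zip aug_ents)
  mat values st.1

-- ===== PRECONDITION & SPEC =====
-- A raises IndexError on aug_ents[i] when entity_slices is longer than aug_ents; only those
-- inputs are excluded.
def Pre_handle_morph (values : List String) (aug_ents : List (List String)) (entity_slices : List (Int × Int)) : Prop :=
  entity_slices.length ≤ aug_ents.length
instance (values : List String) (aug_ents : List (List String)) (entity_slices : List (Int × Int)) : Decidable (Pre_handle_morph values aug_ents entity_slices) := by unfold Pre_handle_morph; infer_instance
def pvWitness_handle_morph : List String × List (List String) × (List (Int × Int)) :=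
  (["a", "b", "c"], [["x", "y"]], [(1, 2)])

def Spec_handle_morph (values : List String) (aug_ents : List (List String)) (entity_slices : List (Int × Int)) (out : List String) : Prop := out = handle_morph_alt values aug_ents entity_slices
instance (values : List String) (aug_ents : List (List String)) (entity_slices : List (Int × Int)) (out : List String) : Decidable (Spec_handle_morph values aug_ents entity_slices out) := by unfold Spec_handle_morph; infer_instance

-- ===== CLAIM (what is proved, stated in full; the proofs are below) =====
def Claim_equal_handle_morph : Prop := ∀ (values : List String) (aug_ents : List (List String)) (entity_slices : List (Int × Int)), Dom_handle_morph values aug_ents entity_slices → Pre_handle_morph values aug_ents entity_slices → Spec_handle_morph values aug_ents entity_slices (handle_morph values aug_ents entity_slices)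
-- ===== LEMMAS AND PROOFS =====

-- well-formed piece (relative to values of length n)
def pieceWF (n : Nat) : Piece → Prop
  | .orig i j => i ≤ j ∧ j ≤ n
  | .fill _ => True

theorem bclamp_eq_clampIdx (i : Int) (n : Nat) : bclamp i n = PySem.List.clampIdx n i := by
  simp only [bclamp, PySem.List.clampIdx]
  split_ifs <;> omega

theorem bclamp_le (i : Int) (n : Nat) : bclamp i n ≤ n := by
  simp only [bclamp]; split_ifs <;> omega

theorem mat_append (v : List String) (ps qs : List Piece) :
    mat v (ps ++ qs) = mat v ps ++ mat v qs := by
  induction ps with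
  | nil => simp [mat]
  | cons p t ih => cases p <;> simp [mat, ih]

theorem mat_take (v : List String) (ps : List Piece) (k : Nat)
    (h : ∀ p ∈ ps, pieceWF v.length p) :
    mat v (psplit k ps).1 = (mat v ps).take k := by
  induction ps generalizing k with
  | nil => simp [mat, psplit]
  | cons p t ih =>
    have hp := h p (by simp)
    have ht : ∀ q ∈ t, pieceWF v.length q := fun q hq => h q (by simp [hq])
    simp only [psplit]
    by_cases h1 : plen p ≤ k
    · rw [if_pos h1]
      cases p with
      | orig i j =>
        obtain ⟨hij, hjn⟩ := hp
        simp only [plen] at h1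
        have hlen : ((v.drop i).take (j - i)).length = j - i := by simp; omega
        simp only [mat, ih _ ht, List.take_append, plen]
        rw [hlen]
        have h2 : ((v.drop i).take (j - i)).take k = (v.drop i).take (j - i) :=
          List.take_of_length_le (by omega)
        rw [h2]
      | fill m =>
        simp only [plen] at h1
        simp only [mat, ih _ ht, List.take_append, plen, List.length_replicate]
        have hr : (List.replicate m ("" : String)).take k = List.replicate m "" :=
          List.take_of_length_le (by simpa using h1)
        rw [hr]
    · rw [if_neg h1]
      by_cases h0 : k = 0
      · subst h0; rw [if_pos rfl]; simp [mat]
      · rw [if_neg h0]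
        cases p with
        | orig i j =>
          obtain ⟨hij, hjn⟩ := hp
          simp only [plen] at h1
          have hlen : ((v.drop i).take (j - i)).length = j - i := by simp; omega
          simp only [mat, List.take_append, hlen, List.append_nil]
          have h2 : k - (j - i) = 0 := by omega
          rw [List.take_take, h2]
          simp only [List.take_zero, List.append_nil]
          congr 1
          omega
        | fill m =>
          simp only [plen] at h1
          simp only [mat, List.take_append, List.length_replicate, List.append_nil]
          have h2 : k - m = 0 := by omega
          rw [List.take_replicate, h2]
          simp only [List.take_zero, List.append_nil]
          congr 1
          omega

theorem mat_drop (v : List String) (ps : List Piece) (k : Nat)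
    (h : ∀ p ∈ ps, pieceWF v.length p) :
    mat v (psplit k ps).2 = (mat v ps).drop k := by
  induction ps generalizing k with
  | nil => simp [mat, psplit]
  | cons p t ih =>
    have hp := h p (by simp)
    have ht : ∀ q ∈ t, pieceWF v.length q := fun q hq => h q (by simp [hq])
    simp only [psplit]
    by_cases h1 : plen p ≤ k
    · rw [if_pos h1]
      cases p with
      | orig i j =>
        obtain ⟨hij, hjn⟩ := hp
        simp only [plen] at h1
        have hlen : ((v.drop i).take (j - i)).length = j - i := by simp; omega
        simp only [mat, ih _ ht, List.drop_append, plen]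
        have hd : ((v.drop i).take (j - i)).drop k = [] := List.drop_eq_nil_of_le (by omega)
        rw [hlen, hd, List.nil_append]
      | fill m =>
        simp only [plen] at h1
        simp only [mat, ih _ ht, List.drop_append, plen, List.length_replicate]
        have hd : (List.replicate m ("" : String)).drop k = [] :=
          List.drop_eq_nil_of_le (by simpa using h1)
        rw [hd, List.nil_append]
    · rw [if_neg h1]
      by_cases h0 : k = 0
      · subst h0; rw [if_pos rfl]; simp
      · rw [if_neg h0]
        cases p with
        | orig i j =>
          obtain ⟨hij, hjn⟩ := hp
          simp only [plen] at h1
          have hlen : ((v.drop i).take (j - i)).length = j - i := by simp; omega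
          simp only [mat, List.drop_append]
          rw [hlen]
          have h2 : k - (j - i) = 0 := by omega
          rw [h2, List.drop_zero, List.drop_take, List.drop_drop, Nat.sub_sub]
        | fill m =>
          simp only [plen] at h1
          simp only [mat, List.drop_append, List.length_replicate]
          have h2 : k - m = 0 := by omega
          rw [h2, List.drop_replicate, List.drop_zero]

theorem psplit_wf (n : Nat) (ps : List Piece) (k : Nat)
    (h : ∀ p ∈ ps, pieceWF n p) :
    (∀ p ∈ (psplit k ps).1, pieceWF n p) ∧ (∀ p ∈ (psplit k ps).2, pieceWF n p) := by
  induction ps generalizing k with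
  | nil => simp [psplit]
  | cons p t ih =>
    have hp := h p (by simp)
    have ht : ∀ q ∈ t, pieceWF n q := fun q hq => h q (by simp [hq])
    simp only [psplit]
    by_cases h1 : plen p ≤ k
    · rw [if_pos h1]
      obtain ⟨ih1, ih2⟩ := ih (k - plen p) ht
      exact ⟨by intro q hq; rcases List.mem_cons.mp hq with rfl | hq; exact hp; exact ih1 q hq, ih2⟩
    · rw [if_neg h1]
      by_cases h0 : k = 0
      · subst h0; rw [if_pos rfl]; exact ⟨by simp, h⟩
      · rw [if_neg h0]
        cases p with
        | orig i j =>
          obtain ⟨hij, hjn⟩ := hp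
          simp only [plen] at h1
          refine ⟨by simp [pieceWF]; omega, ?_⟩
          intro q hq
          rcases List.mem_cons.mp hq with rfl | hq
          · exact ⟨by omega, hjn⟩
          · exact ht q hq
        | fill m =>
          refine ⟨by simp [pieceWF], ?_⟩
          intro q hq
          rcases List.mem_cons.mp hq with rfl | hq
          · trivial
          · exact ht q hq

theorem step_eq (v l : List String) (ps : List Piece) (x y : Int) (m : Nat)
    (hmat : mat v ps = l) (hwf : ∀ p ∈ ps, pieceWF v.length p) :
    mat v ((psplit (bclamp x l.length) ps).1 ++ [Piece.fill m] ++
      (psplit (max (bclamp x l.length) (bclamp y l.length)) ps).2)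
      = pySetSlice l x y (List.replicate m "") ∧
    (∀ p ∈ (psplit (bclamp x l.length) ps).1 ++ [Piece.fill m] ++
      (psplit (max (bclamp x l.length) (bclamp y l.length)) ps).2, pieceWF v.length p) ∧
    l.length + m - (max (bclamp x l.length) (bclamp y l.length) - bclamp x l.length)
      = (pySetSlice l x y (List.replicate m "")).length := by
  subst hmat
  set L := (mat v ps).length with hL
  set a := bclamp x L with ha
  set b := max a (bclamp y L) with hb
  have haL : a ≤ L := bclamp_le x L
  have hbL : b ≤ L := by
    have := bclamp_le y L
    omega
  have hab : a ≤ b := le_max_left _ _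
  have hset : pySetSlice (mat v ps) x y (List.replicate m "") =
      (mat v ps).take a ++ List.replicate m "" ++ (mat v ps).drop b := by
    simp only [pySetSlice, ← hL, ← bclamp_eq_clampIdx, ← ha, ← hb]
  refine ⟨?_, ?_, ?_⟩
  · rw [mat_append, mat_append, mat_take v ps a hwf, mat_drop v ps b hwf, hset]
    simp [mat]
  · intro p hp
    simp only [List.mem_append, List.mem_singleton] at hp
    rcases hp with (hp | rfl) | hp
    · exact (psplit_wf v.length ps a hwf).1 p hp
    · trivial
    · exact (psplit_wf v.length ps b hwf).2 p hp
  · rw [hset]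
    simp only [List.length_append, List.length_take, List.length_drop, List.length_replicate]
    omega

theorem loop_eq (v : List String) (aug_ents : List (List String)) :
    ∀ (slices : List (Int × Int)) (k : Nat), slices.length + k ≤ aug_ents.length →
    ∀ (l : List String) (r : Int) (ps : List Piece),
    mat v ps = l → (∀ p ∈ ps, pieceWF v.length p) →
    (List.foldl (fun (st : List String × Int) (p : Int × (Int × Int)) =>
        let ents := PySem.List.pyGetD aug_ents p.1 []
        let fill := List.replicate ents.length ""
        (pySetSlice st.1 (p.2.1 + st.2) (p.2.2 + st.2) fill,
         st.2 + (ents.length : Int) - (p.2.2 - p.2.1)))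
      (l, r) (PySem.List.enumerate slices (k : Int))).1 =
    mat v (List.foldl (fun (st : List Piece × Nat × Int) (q : (Int × Int) × List String) =>
        let a := bclamp (q.1.1 + st.2.2) st.2.1
        let b := max a (bclamp (q.1.2 + st.2.2) st.2.1)
        let pre := (psplit a st.1).1
        let post := (psplit b st.1).2
        (pre ++ [Piece.fill q.2.length] ++ post,
         st.2.1 + q.2.length - (b - a),
         st.2.2 + (q.2.length : Int) - (q.1.2 - q.1.1)))
      (ps, l.length, r) (slices.zip (aug_ents.drop k))).1 := by
  intro slices
  induction slices with
  | nil =>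
    intro k hk l r ps hmat hwf
    simp [PySem.List.enumerate_nil, hmat]
  | cons s rest ih =>
    intro k hk l r ps hmat hwf
    have hklen : k < aug_ents.length := by simp at hk; omega
    rw [PySem.List.enumerate_cons, List.drop_eq_getElem_cons hklen]
    simp only [List.zip_cons_cons, List.foldl_cons]
    have hg : PySem.List.pyGetD aug_ents ((k : Int)) [] = aug_ents[k] := by
      rw [PySem.List.pyGetD_natCast]
      exact List.getD_eq_getElem aug_ents [] hklen
    obtain ⟨e1, e2, e3⟩ := step_eq v l ps (s.1 + r) (s.2 + r) (aug_ents[k]).length hmat hwf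
    have hcast : (k : Int) + 1 = ((k + 1 : Nat) : Int) := by push_cast; ring
    rw [hcast]
    simp only [hg, e3]
    exact ih (k + 1) (by simp at hk ⊢; omega) _ _ _ e1 e2

-- ===== VERDICT (by name: the statement is the Claim_ definition above) =====
theorem handle_morph_spec : Claim_equal_handle_morph := by
  intro values aug_ents entity_slices _ hpre
  unfold Spec_handle_morph handle_morph handle_morph_alt
  have h := loop_eq values aug_ents entity_slices 0
    (by simpa [Pre_handle_morph] using hpre) values 0 [Piece.orig 0 values.length]
    (by simp [mat])
    (by intro p hp; simp only [List.mem_singleton] at hp; subst hp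
        exact ⟨Nat.zero_le _, le_rfl⟩)
  simpa using h
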